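-- pv_equiv track=rewrite | github.com/ekansh-aio/sdlc-agent-v2 | frontend/src/utils/formatters.py | fmt_tcg_response
-- ===== SOURCE A (Python) =====
-- def fmt_tcg_response(text: str) -> str:
--     replacements = [
--         ("TestCaseID:",      "**TestCaseID:** "),
--         ("Summary:",         "**Summary:** "),
--         ("Description:",     "**Description:** "),
--         ("Action:",          "**Action:** "),
--         ("Data:",            "**Data:** "),
--         ("Expected Result:", "**Expected Result:** "),
--         ("Priority:",        "**Priority:** "),
--         ("ManualSteps:",     "**Manual Steps:** "),
--         ("cucumber_steps:",  "**Cucumber Steps:** "),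
--     ]
--     for old, new in replacements:
--         text = text.replace(old, new)
--     return text
-- ===== SOURCE B (Python) =====
-- def fmt_tcg_response(text: str) -> str:
--     bold = {
--         "TestCaseID:": "**TestCaseID:** ",
--         "Summary:": "**Summary:** ",
--         "Description:": "**Description:** ",
--         "Action:": "**Action:** ",
--         "Data:": "**Data:** ",
--         "Expected Result:": "**Expected Result:** ",
--         "Priority:": "**Priority:** ",
--         "ManualSteps:": "**Manual Steps:** ",
--         "cucumber_steps:": "**Cucumber Steps:** ",
--     }
--     out = []
--     i = 0
--     n = len(text)
--     while i < n:
--         for label, repl in bold.items():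
--             if text.startswith(label, i):
--                 out.append(repl)
--                 i += len(label)
--                 break
--         else:
--             out.append(text[i])
--             i += 1
--     return "".join(out)
-- ===== Notes on version B (the rewrite author's own statement) =====
-- stated objective: alternative
-- what changed: Replaces nine sequential whole-string str.replace passes by a single left-to-right scan that at each position tries the nine labels in order against a table and emits either the bolded replacement or the current character.
import Mathlib
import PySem

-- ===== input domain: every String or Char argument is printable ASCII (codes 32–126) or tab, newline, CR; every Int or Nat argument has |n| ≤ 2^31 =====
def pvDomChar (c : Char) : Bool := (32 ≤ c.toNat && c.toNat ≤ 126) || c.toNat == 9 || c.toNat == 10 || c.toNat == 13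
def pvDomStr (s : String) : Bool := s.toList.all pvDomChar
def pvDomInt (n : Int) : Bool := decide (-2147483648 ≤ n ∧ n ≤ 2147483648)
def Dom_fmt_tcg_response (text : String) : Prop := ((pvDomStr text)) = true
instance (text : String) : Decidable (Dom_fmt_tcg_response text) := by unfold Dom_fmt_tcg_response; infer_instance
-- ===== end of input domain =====

-- B replaces A's nine sequential whole-string .replace passes by ONE left-to-right scan
-- driven by a label table (objective: alternative single-pass algorithm, same results).


-- ===== PORT A =====
def pvPairs : List (String × String) :=
  [("TestCaseID:",      "**TestCaseID:** "),
   ("Summary:",         "**Summary:** "),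
   ("Description:",     "**Description:** "),
   ("Action:",          "**Action:** "),
   ("Data:",            "**Data:** "),
   ("Expected Result:", "**Expected Result:** "),
   ("Priority:",        "**Priority:** "),
   ("ManualSteps:",     "**Manual Steps:** "),
   ("cucumber_steps:",  "**Cucumber Steps:** ")]

def fmt_tcg_response (text : String) : String :=
  pvPairs.foldl (fun t pr => PySem.Str.replace t pr.1 pr.2) text

-- ===== PORT B =====
-- the same table, on code points (Source B's `table`)
def pvTable : List (List Char × List Char) :=
  [("TestCaseID:".toList,      "**TestCaseID:** ".toList),
   ("Summary:".toList,         "**Summary:** ".toList),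
   ("Description:".toList,     "**Description:** ".toList),
   ("Action:".toList,          "**Action:** ".toList),
   ("Data:".toList,            "**Data:** ".toList),
   ("Expected Result:".toList, "**Expected Result:** ".toList),
   ("Priority:".toList,        "**Priority:** ".toList),
   ("ManualSteps:".toList,     "**Manual Steps:** ".toList),
   ("cucumber_steps:".toList,  "**Cucumber Steps:** ".toList)]

-- needed by pvScan's termination proof (every label is nonempty)
theorem pvTable_fst_ne_nil : ∀ pr ∈ pvTable, pr.1 ≠ [] := by decide

-- Source B's while-loop: at each position try the labels in order (the inner for/break),
-- on a hit emit the replacement and skip the label, otherwise emit the character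
def pvScan : List Char → List Char
  | [] => []
  | c :: t =>
    match h : pvTable.find? (fun pr => PySem.Chars.startswith (c :: t) pr.1) with
    | some pr => pr.2 ++ pvScan ((c :: t).drop pr.1.length)
    | none => c :: pvScan t
termination_by l => l.length
decreasing_by
  · have hm : pr ∈ pvTable := List.mem_of_find?_eq_some h
    have hne : pr.1 ≠ [] := pvTable_fst_ne_nil _ hm
    have : 1 ≤ pr.1.length := List.length_pos_iff.mpr hne
    simp only [List.length_drop, List.length_cons]
    omega
  · simp

def fmt_tcg_response_alt (text : String) : String :=
  String.ofList (pvScan text.toList)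

-- ===== PRECONDITION & SPEC =====
def Spec_fmt_tcg_response (text : String) (out : String) : Prop := out = fmt_tcg_response_alt text
instance (text : String) (out : String) : Decidable (Spec_fmt_tcg_response text out) := by unfold Spec_fmt_tcg_response; infer_instance

-- ===== CLAIM (what is proved, stated in full; the proofs are below) =====
def Claim_equal_fmt_tcg_response : Prop := ∀ (text : String), Dom_fmt_tcg_response text → Spec_fmt_tcg_response text (fmt_tcg_response text)

-- ===== LEMMAS AND PROOFS =====

-- structural model of Python's str.replace (for a nonempty pattern)
def pvRepl (old new : List Char) : List Char → List Char
  | [] => []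
  | c :: t =>
    if old.isPrefixOf (c :: t) then new ++ pvRepl old new (t.drop (old.length - 1))
    else c :: pvRepl old new t
termination_by l => l.length
decreasing_by
  · have := List.length_drop (l := t) (i := old.length - 1)
    simp only [List.length_cons]
    omega
  · simp

theorem pvRepl_pos (old new : List Char) (c : Char) (t : List Char) (h : old <+: (c :: t)) :
    pvRepl old new (c :: t) = new ++ pvRepl old new (t.drop (old.length - 1)) := by
  rw [pvRepl, if_pos (List.isPrefixOf_iff_prefix.mpr h)]

theorem pvRepl_neg (old new : List Char) (c : Char) (t : List Char) (h : ¬ old <+: (c :: t)) :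
    pvRepl old new (c :: t) = c :: pvRepl old new t := by
  rw [pvRepl, if_neg (by rw [List.isPrefixOf_iff_prefix]; exact h)]

theorem pvGo_eq (old new : List Char) (hne : old ≠ []) :
    ∀ (fuel : Nat) (l acc : List Char), l.length ≤ fuel →
      PySem.Chars.replace.go old new fuel l acc = acc.reverse ++ pvRepl old new l := by
  intro fuel
  induction fuel with
  | zero =>
    intro l acc hl
    have : l = [] := List.eq_nil_of_length_eq_zero (Nat.le_zero.mp hl)
    subst this
    simp [PySem.Chars.replace.go, pvRepl]
  | succ f ih =>
    intro l acc hl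
    match l with
    | [] => simp [PySem.Chars.replace.go, pvRepl]
    | c :: t =>
      rw [PySem.Chars.replace.go]
      simp only [List.length_cons] at hl
      have hlen : 1 ≤ old.length := List.length_pos_iff.mpr hne
      by_cases hp : old.isPrefixOf (c :: t)
      · have hdrop : (c :: t).drop old.length = t.drop (old.length - 1) := by
          obtain ⟨k, hk⟩ : ∃ k, old.length = k + 1 := ⟨old.length - 1, by omega⟩
          simp [hk]
        rw [if_pos hp, hdrop, ih _ _ (by rw [List.length_drop]; omega)]
        rw [pvRepl_pos old new c t (List.isPrefixOf_iff_prefix.mp hp)]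
        simp
      · rw [if_neg hp, ih t (c :: acc) (by omega)]
        rw [pvRepl_neg old new c t (fun hh => hp (List.isPrefixOf_iff_prefix.mpr hh))]
        simp

theorem pvReplace_eq (s old new : List Char) (hne : old ≠ []) :
    PySem.Chars.replace s old new = pvRepl old new s := by
  rw [PySem.Chars.replace]
  rw [if_neg (by simp [List.isEmpty_iff, hne])]
  simpa using pvGo_eq old new hne s.length s [] le_rfl

theorem pvReplA (s old new : String) (hne : old.toList ≠ []) :
    (PySem.Str.replace s old new).toList = pvRepl old.toList new.toList s.toList := by
  rw [PySem.Str.toList_replace, pvReplace_eq _ _ _ hne]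

-- the A-side fold, on code points
def pvFold (rs : List (List Char × List Char)) (s : List Char) : List Char :=
  rs.foldl (fun t pr => pvRepl pr.1 pr.2 t) s

-- "pattern p cannot match at any offset inside q" (no overlap with q)
def pvNoOv (p q : List Char) : Prop :=
  ∀ d < q.length, ¬ (q.drop d <+: p) ∧ ¬ (p <+: q.drop d)

def pvNoOvB (p q : List Char) : Bool :=
  (List.range q.length).all fun d => !((q.drop d).isPrefixOf p) && !(p.isPrefixOf (q.drop d))

theorem pvNoOvB_sound (p q : List Char) (h : pvNoOvB p q = true) : pvNoOv p q := by
  intro d hd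
  have := List.all_eq_true.mp h d (List.mem_range.mpr hd)
  simp only [Bool.and_eq_true, Bool.not_eq_true'] at this
  constructor
  · intro hc; rw [List.isPrefixOf_iff_prefix.symm] at hc; simp [hc] at this
  · intro hc; rw [List.isPrefixOf_iff_prefix.symm] at hc; simp [hc] at this

theorem pvPrefix_cases {p q X : List Char} (h : p <+: q ++ X) : q <+: p ∨ p <+: q :=
  List.prefix_or_prefix_of_prefix (List.prefix_append q X) h

-- a non-overlapping block q passes through pvRepl untouched
theorem pvRepl_pull (p r : List Char) :
    ∀ (q X : List Char), pvNoOv p q → pvRepl p r (q ++ X) = q ++ pvRepl p r X := by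
  intro q
  induction q with
  | nil => intro X _; simp
  | cons c q' ih =>
    intro X hno
    have h0 := hno 0 (by simp)
    simp only [List.drop_zero] at h0
    have hnp : ¬ p <+: (c :: (q' ++ X)) := by
      intro hpre
      rcases pvPrefix_cases (show p <+: (c :: q') ++ X by simpa using hpre) with h | h
      · exact h0.1 h
      · exact h0.2 h
    have hno' : pvNoOv p q' := by
      intro d hd
      have := hno (d + 1) (by simp; omega)
      simpa using this
    simp only [List.cons_append]
    rw [pvRepl_neg p r c (q' ++ X) hnp, ih X hno']

-- pvRepl with a replacement starting with '*' either preserves a prefix or stars it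
theorem pvTake_repl (p rt : List Char) :
    ∀ (s : List Char) (m : Nat),
      List.take m (pvRepl p ('*' :: rt) s) = List.take m s ∨ '*' ∈ List.take m (pvRepl p ('*' :: rt) s) := by
  intro s
  induction s using pvRepl.induct p with
  | case1 => intro m; left; simp [pvRepl]
  | case2 c t hp ih =>
    intro m
    match m with
    | 0 => left; simp
    | Nat.succ k =>
      right
      rw [pvRepl_pos p _ c t (List.isPrefixOf_iff_prefix.mp hp)]
      simp
  | case3 c t hp ih =>
    intro m
    match m with
    | 0 => left; simp
    | Nat.succ k =>
      rw [pvRepl_neg p _ c t (fun hh => by simp [List.isPrefixOf_iff_prefix.mpr hh] at hp)]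
      rcases ih k with h | h
      · left; simp [List.take_succ_cons, h]
      · right; simp [List.take_succ_cons]; right; exact h

-- table well-formedness facts
def pvOkPair (pr : List Char × List Char) : Prop :=
  pr.1 ≠ [] ∧ '*' ∉ pr.1 ∧ ∃ rt, pr.2 = '*' :: rt

def pvOkPairB (pr : List Char × List Char) : Bool :=
  !pr.1.isEmpty && !pr.1.contains '*' && (pr.2.head? == some '*')

theorem pvOkPairB_sound (pr : List Char × List Char) (h : pvOkPairB pr = true) : pvOkPair pr := by
  simp only [pvOkPairB, Bool.and_eq_true, Bool.not_eq_true'] at h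
  obtain ⟨⟨h1, h2⟩, h3⟩ := h
  refine ⟨by simpa [List.isEmpty_iff] using h1, ?_, ?_⟩
  · intro hm
    have : pr.1.contains '*' = true := by
      simpa [List.contains_iff_mem] using hm
    rw [this] at h2
    simp at h2
  · match hpr : pr.2 with
    | [] => rw [hpr] at h3; simp at h3
    | a :: l =>
      rw [hpr] at h3
      simp only [List.head?_cons, beq_iff_eq, Option.some.injEq] at h3
      exact ⟨l, by rw [h3]⟩

theorem pvTable_ok : ∀ pr ∈ pvTable, pvOkPair pr := by
  intro pr hpr
  have hall : pvTable.all pvOkPairB = true := by decide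
  exact pvOkPairB_sound pr (List.all_eq_true.mp hall pr hpr)

-- pairwise non-overlap: for x before y in the table, y's label cannot match inside
-- x's label (pre passes leave the matched label intact) nor inside x's replacement
-- (later passes leave inserted replacements intact)
def pvR (x y : List Char × List Char) : Prop := pvNoOv x.1 y.1 ∧ pvNoOv y.1 x.2

def pvPairwiseB : List (List Char × List Char) → Bool
  | [] => true
  | x :: l => (l.all fun y => pvNoOvB x.1 y.1 && pvNoOvB y.1 x.2) && pvPairwiseB l

theorem pvPairwiseB_sound : ∀ l, pvPairwiseB l = true → List.Pairwise pvR l := by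
  intro l
  induction l with
  | nil => intro _; exact List.Pairwise.nil
  | cons x l ih =>
    intro h
    simp only [pvPairwiseB, Bool.and_eq_true] at h
    refine List.Pairwise.cons ?_ (ih h.2)
    intro y hy
    have := List.all_eq_true.mp h.1 y hy
    simp only [Bool.and_eq_true] at this
    exact ⟨pvNoOvB_sound _ _ this.1, pvNoOvB_sound _ _ this.2⟩

theorem pvTable_pairwise : List.Pairwise pvR pvTable :=
  pvPairwiseB_sound _ (by decide)

-- a whole-table fold over a q-block with no overlaps
theorem pvFold_pull (rs : List (List Char × List Char)) (q : List Char)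
    (hno : ∀ pr ∈ rs, pvNoOv pr.1 q) :
    ∀ X, pvFold rs (q ++ X) = q ++ pvFold rs X := by
  induction rs with
  | nil => intro X; simp [pvFold]
  | cons pr rest ih =>
    intro X
    simp only [pvFold, List.foldl_cons]
    rw [pvRepl_pull pr.1 pr.2 q X (hno pr (by simp))]
    exact ih (fun x hx => hno x (by simp [hx])) _

theorem pvFold_nil (rs : List (List Char × List Char)) : pvFold rs [] = [] := by
  induction rs with
  | nil => rfl
  | cons pr rest ih => simpa [pvFold, pvRepl] using ih

-- the no-match-at-this-position case: every pvRepl peels the head char off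
theorem pvFold_none (c : Char) (t : List Char) :
    ∀ (rs : List (List Char × List Char)) (t' : List Char),
      (∀ pr ∈ rs, pvOkPair pr) →
      (∀ m, List.take m t' = List.take m t ∨ '*' ∈ List.take m t') →
      (∀ pr ∈ rs, ¬ pr.1 <+: (c :: t)) →
      pvFold rs (c :: t') = c :: pvFold rs t' ∧
      (∀ m, List.take m (pvFold rs t') = List.take m t ∨ '*' ∈ List.take m (pvFold rs t')) := by
  intro rs
  induction rs with
  | nil => intro t' _ hinv _; exact ⟨rfl, hinv⟩
  | cons pr rest ih =>
    intro t' hok hinv hnm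
    obtain ⟨hne, hstar, rt, hrt⟩ := hok pr (by simp)
    have hnp : ¬ pr.1 <+: (c :: t') := by
      intro hpre
      match hp1 : pr.1 with
      | [] => exact hne hp1
      | c1 :: p' =>
        rw [hp1] at hpre
        rw [List.cons_prefix_cons] at hpre
        obtain ⟨hc, hp'⟩ := hpre
        have htake : p' = List.take p'.length t' := List.prefix_iff_eq_take.mp hp'
        rcases hinv p'.length with h | h
        · apply hnm pr (by simp)
          rw [hp1, hc, List.cons_prefix_cons]
          exact ⟨rfl, List.prefix_iff_eq_take.mpr (htake.trans h)⟩
        · apply hstar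
          rw [hp1]
          right
          rw [htake]; exact h
    have hstep : pvRepl pr.1 pr.2 (c :: t') = c :: pvRepl pr.1 pr.2 t' :=
      pvRepl_neg pr.1 pr.2 c t' hnp
    have hinv' : ∀ m, List.take m (pvRepl pr.1 pr.2 t') = List.take m t ∨
        '*' ∈ List.take m (pvRepl pr.1 pr.2 t') := by
      intro m
      have h1 := pvTake_repl pr.1 rt t' m
      rw [← hrt] at h1
      rcases h1 with h1 | h1
      · rw [h1]; exact hinv m
      · right; exact h1
    have hrec := ih (pvRepl pr.1 pr.2 t') (fun x hx => hok x (by simp [hx])) hinv'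
        (fun x hx => hnm x (by simp [hx]))
    refine ⟨?_, hrec.2⟩
    simp only [pvFold, List.foldl_cons]
    rw [hstep]
    exact hrec.1

-- the matching step itself
theorem pvRepl_fire (o n Y : List Char) (hne : o ≠ []) :
    pvRepl o n (o ++ Y) = n ++ pvRepl o n Y := by
  match o with
  | [] => exact absurd rfl hne
  | c :: o' =>
    have hpre : (c :: o') <+: (c :: (o' ++ Y)) :=
      List.cons_prefix_cons.mpr ⟨rfl, List.prefix_append o' Y⟩
    rw [List.cons_append, pvRepl_pos (c :: o') n c (o' ++ Y) hpre]
    simp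

-- MAIN: one table-driven pass equals the nine sequential replace passes
theorem pvMain : ∀ s : List Char, pvFold pvTable s = pvScan s := by
  intro s
  induction s using pvScan.induct with
  | case1 => simp [pvScan, pvFold_nil]
  | case2 c t pr hfind ih =>
    obtain ⟨hpb, pre, post, hsplit, hpre⟩ := List.find?_eq_some_iff_append.mp hfind
    have hmatch : pr.1 <+: (c :: t) := (PySem.Chars.startswith_iff _ _).mp hpb
    have hne : pr.1 ≠ [] := (pvTable_ok pr (by rw [hsplit]; simp)).1
    obtain ⟨u, hu⟩ := hmatch
    have hpw := pvTable_pairwise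
    rw [hsplit, List.pairwise_append] at hpw
    obtain ⟨hpw1, hpw2, hpw3⟩ := hpw
    have hdrop : (c :: t).drop pr.1.length = u := by
      rw [← hu, List.drop_left]
    have hfold : pvFold pvTable (c :: t) = pvFold post (pvRepl pr.1 pr.2 (pvFold pre (c :: t))) := by
      rw [hsplit]; simp [pvFold, List.foldl_append]
    have hfoldu : pvFold pvTable u = pvFold post (pvRepl pr.1 pr.2 (pvFold pre u)) := by
      rw [hsplit]; simp [pvFold, List.foldl_append]
    have hprepull : pvFold pre (c :: t) = pr.1 ++ pvFold pre u := by
      rw [← hu]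
      exact pvFold_pull pre pr.1 (fun x hx => (hpw3 x hx pr (by simp)).1) u
    have hpostpull : pvFold post (pr.2 ++ pvRepl pr.1 pr.2 (pvFold pre u)) =
        pr.2 ++ pvFold post (pvRepl pr.1 pr.2 (pvFold pre u)) := by
      refine pvFold_pull post pr.2 ?_ _
      intro x hx
      exact (List.rel_of_pairwise_cons hpw2 hx).2
    rw [hdrop] at ih
    rw [hfold, hprepull, pvRepl_fire _ _ _ hne, hpostpull, ← hfoldu, ih, pvScan, hfind]
    split
    · rename_i pr' heq
      injection heq with h'
      subst h'
      rw [hdrop]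
    · rename_i heq
      simp at heq
  | case3 c t hfind ih =>
    have hnm : ∀ pr ∈ pvTable, ¬ pr.1 <+: (c :: t) := by
      intro pr hpr hpre
      have := List.find?_eq_none.mp hfind pr hpr
      exact this ((PySem.Chars.startswith_iff _ _).mpr hpre)
    have hrec := pvFold_none c t pvTable t pvTable_ok (fun m => Or.inl rfl) hnm
    rw [hrec.1, ih, pvScan, hfind]

theorem pvBridgeA (text : String) :
    (fmt_tcg_response text).toList = pvFold pvTable text.toList := by
  simp only [fmt_tcg_response, pvPairs, List.foldl_cons, List.foldl_nil]
  rw [pvReplA _ _ _ (by decide), pvReplA _ _ _ (by decide), pvReplA _ _ _ (by decide),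
      pvReplA _ _ _ (by decide), pvReplA _ _ _ (by decide), pvReplA _ _ _ (by decide),
      pvReplA _ _ _ (by decide), pvReplA _ _ _ (by decide), pvReplA _ _ _ (by decide)]
  simp [pvFold, pvTable]

-- ===== VERDICT (by name: the statement is the Claim_ definition above) =====
theorem fmt_tcg_response_spec : Claim_equal_fmt_tcg_response := by
  intro text _
  unfold Spec_fmt_tcg_response fmt_tcg_response_alt
  have h : (fmt_tcg_response text).toList = pvScan text.toList := by
    rw [pvBridgeA, pvMain]
  calc fmt_tcg_response text
      = String.ofList (fmt_tcg_response text).toList := by rw [String.ofList_toList]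
    _ = String.ofList (pvScan text.toList) := by rw [h]
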